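-- pv_equiv track=rewrite | github.com/trinhquoctrong/PythonCodePTIT | PY01039.py | solve
-- ===== SOURCE A (Python) =====
-- def solve(s):
--     for i in range (0, len(s), 2):
--         if s[i] != s[0]:
--             return False
--     for i in range (1, len(s), 2):
--         if s[i] != s[1]:
--             return False
--     return True
-- ===== SOURCE B (Python) =====
-- def solve(s):
--     return s[2:] == s[:-2]
-- ===== Notes on version B (the rewrite author's own statement) =====
-- stated objective: simpler
-- what changed: Replaces the two index loops anchored at s[0]/s[1] by a single shifted-slice comparison s[2:] == s[:-2] (every character equals the one two positions earlier).
import Mathlib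
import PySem

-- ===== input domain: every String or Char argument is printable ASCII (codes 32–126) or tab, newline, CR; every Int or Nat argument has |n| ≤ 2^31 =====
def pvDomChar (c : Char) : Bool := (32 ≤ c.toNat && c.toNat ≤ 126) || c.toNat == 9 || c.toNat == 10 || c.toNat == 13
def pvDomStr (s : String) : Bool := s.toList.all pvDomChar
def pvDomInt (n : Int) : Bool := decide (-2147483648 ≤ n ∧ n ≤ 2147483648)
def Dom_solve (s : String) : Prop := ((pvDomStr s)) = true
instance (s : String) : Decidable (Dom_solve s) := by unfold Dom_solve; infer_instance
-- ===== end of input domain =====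

-- B replaces A's two index loops by one shifted-slice comparison (s[2:] == s[:-2]); objective: simpler.

-- ===== PORT A =====
def solve (s : String) : Bool :=
  let l := s.toList
  ((PySem.List.pyRange 0 (l.length : Int) 2).all fun i =>
      PySem.List.pyGet? l i == PySem.List.pyGet? l 0) &&
  ((PySem.List.pyRange 1 (l.length : Int) 2).all fun i =>
      PySem.List.pyGet? l i == PySem.List.pyGet? l 1)

-- ===== PORT B =====
def solve_alt (s : String) : Bool :=
  PySem.List.slice s.toList (some 2) none == PySem.List.slice s.toList none (some (-2))

-- ===== PRECONDITION & SPEC =====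
def Spec_solve (s : String) (out : Bool) : Prop := out = solve_alt s
instance (s : String) (out : Bool) : Decidable (Spec_solve s out) := by unfold Spec_solve; infer_instance

-- ===== CLAIM (what is proved, stated in full; the proofs are below) =====
def Claim_equal_solve : Prop := ∀ (s : String), Dom_solve s → Spec_solve s (solve s)

-- ===== LEMMAS AND PROOFS =====

-- One loop of A checks all indices ≡ a (mod 2) against position a.
theorem allEq_iff (l : List Char) (a : Nat) :
    (((PySem.List.pyRange (a : Int) (l.length : Int) 2).all fun i =>
        PySem.List.pyGet? l i == PySem.List.pyGet? l (a : Int)) = true) ↔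
    ∀ k : Nat, a + 2 * k < l.length → l[a + 2 * k]? = l[a]? := by
  rw [List.all_eq_true]
  constructor
  · intro h k hk
    have hmem : ((a : Int) + 2 * k) ∈ PySem.List.pyRange (a : Int) (l.length : Int) 2 := by
      rw [PySem.List.mem_pyRange_iff_of_pos (by omega)]
      refine ⟨by omega, by omega, ⟨k, by ring⟩⟩
    have := h _ hmem
    simp only [beq_iff_eq] at this
    have hcast : ((a : Int) + 2 * k) = ((a + 2 * k : Nat) : Int) := by push_cast; ring
    rw [hcast, PySem.List.pyGet?_natCast, PySem.List.pyGet?_natCast] at this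
    exact this
  · intro h i hi
    rw [PySem.List.mem_pyRange_iff_of_pos (by omega)] at hi
    obtain ⟨h1, h2, m, hm⟩ := hi
    have hm0 : 0 ≤ m := by omega
    have hi' : i = ((a + 2 * m.toNat : Nat) : Int) := by push_cast; omega
    have hlt : a + 2 * m.toNat < l.length := by
      have : i < (l.length : Int) := h2
      omega
    simp only [beq_iff_eq, hi', PySem.List.pyGet?_natCast]
    exact h m.toNat hlt

-- B's slice comparison says: every index equals the one two before it.
theorem sliceEq_iff (l : List Char) :
    ((l.drop 2 == l.take (l.length - 2)) = true) ↔
    ∀ j : Nat, j + 2 < l.length → l[j + 2]? = l[j]? := by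
  rw [beq_iff_eq, List.ext_getElem?_iff]
  constructor
  · intro h j hj
    have := h j
    rw [List.getElem?_drop, List.getElem?_take_of_lt (by omega)] at this
    rw [Nat.add_comm 2 j] at this
    exact this
  · intro h j
    rw [List.getElem?_drop]
    by_cases hj : j < l.length - 2
    · rw [List.getElem?_take_of_lt hj, Nat.add_comm 2 j]
      exact h j (by omega)
    · rw [List.getElem?_eq_none (by omega), List.getElem?_eq_none (by simp; omega)]

-- The two characterisations coincide.
theorem core_iff (l : List Char) :
    ((∀ k : Nat, 0 + 2 * k < l.length → l[0 + 2 * k]? = l[0]?) ∧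
     (∀ k : Nat, 1 + 2 * k < l.length → l[1 + 2 * k]? = l[1]?)) ↔
    ∀ j : Nat, j + 2 < l.length → l[j + 2]? = l[j]? := by
  constructor
  · rintro ⟨h0, h1⟩ j hj
    rcases Nat.even_or_odd j with ⟨k, hk⟩ | ⟨k, hk⟩
    · have e1 := h0 (k + 1) (by omega)
      have e2 := h0 k (by omega)
      have : j + 2 = 0 + 2 * (k + 1) := by omega
      rw [this, e1, show j = 0 + 2 * k by omega, e2]
    · have e1 := h1 (k + 1) (by omega)
      have e2 := h1 k (by omega)
      have : j + 2 = 1 + 2 * (k + 1) := by omega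
      rw [this, e1, show j = 1 + 2 * k by omega, e2]
  · intro h
    constructor
    · intro k
      induction k with
      | zero => intro _; rfl
      | succ k ih =>
        intro hk
        have : 0 + 2 * (k + 1) = (0 + 2 * k) + 2 := by omega
        rw [this, h _ (by omega)]
        exact ih (by omega)
    · intro k
      induction k with
      | zero => intro _; rfl
      | succ k ih =>
        intro hk
        have : 1 + 2 * (k + 1) = (1 + 2 * k) + 2 := by omega
        rw [this, h _ (by omega)]
        exact ih (by omega)

-- ===== VERDICT (by name: the statement is the Claim_ definition above) =====
theorem solve_spec : Claim_equal_solve := by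
  intro s _
  unfold Spec_solve solve solve_alt
  have hfrom : PySem.List.slice s.toList (some 2) none = s.toList.drop 2 := by
    have := PySem.List.slice_from (xs := s.toList) (a := 2) (by omega)
    simpa using this
  have hto : PySem.List.slice s.toList none (some (-2)) = s.toList.take (s.toList.length - 2) := by
    exact PySem.List.slice_to_neg_ofNat s.toList 2 (by omega)
  rw [hfrom, hto]
  apply Bool.eq_iff_iff.mpr
  rw [Bool.and_eq_true, sliceEq_iff]
  have h0 := allEq_iff s.toList 0
  have h1 := allEq_iff s.toList 1
  simp only [Nat.cast_zero, Nat.cast_one] at h0 h1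
  rw [h0, h1]
  exact core_iff s.toList
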